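-- pv_equiv track=rewrite | github.com/Hithru/IEEEXtreme | HackerRank/ProblemSolving/Anagrams.py | encryption
-- ===== SOURCE A (Python) =====
-- def encryption(string:str):
--     if len(string) % 2 == 1:
--         return -1
--     string1 = string[:len(string) // 2]
--     string2 = string[len(string) // 2:]
--     characters = {}
--     answer = 0
--     for i in string1:
--         characters.setdefault(i, 0)
--         characters[i] += 1
--     for j in string2:
--         if j in characters:
--             characters[j] -= 1
--             if characters[j] == 0:
--                 del characters[j]
--         else:
--             answer += 1
--
--     return answer
-- ===== SOURCE B (Python) =====
-- def encryption(string: str):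
--     if len(string) % 2 == 1:
--         return -1
--     half = len(string) // 2
--     c1 = {}
--     for ch in string[:half]:
--         c1[ch] = c1.get(ch, 0) + 1
--     c2 = {}
--     for ch in string[half:]:
--         c2[ch] = c2.get(ch, 0) + 1
--     answer = 0
--     for ch, n in c2.items():
--         deficit = n - c1.get(ch, 0)
--         if deficit > 0:
--             answer += deficit
--     return answer
-- ===== Notes on version B (the rewrite author's own statement) =====
-- stated objective: alternative
-- what changed: A consumes a single mutating dict (decrement/delete per second-half character, counting misses); B builds two independent frequency maps and sums the positive deficits count2(c)-count1(c) in one comparison pass, never mutating a counter while scanning.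
import Mathlib
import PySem

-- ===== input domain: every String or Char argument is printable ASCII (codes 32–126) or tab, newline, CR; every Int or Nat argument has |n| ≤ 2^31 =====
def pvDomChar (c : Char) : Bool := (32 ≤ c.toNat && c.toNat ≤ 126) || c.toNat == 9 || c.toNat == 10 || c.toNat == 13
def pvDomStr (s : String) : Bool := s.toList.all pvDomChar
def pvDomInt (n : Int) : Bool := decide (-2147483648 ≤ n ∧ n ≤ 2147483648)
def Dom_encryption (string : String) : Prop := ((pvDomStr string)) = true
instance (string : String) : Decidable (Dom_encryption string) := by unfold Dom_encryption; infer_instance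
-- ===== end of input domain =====

-- B replaces A's single mutating consume-loop (decrement/delete, count misses) by two
-- independent frequency maps and a comparison pass summing positive deficits ("alternative").

-- ===== PORT A =====
-- the body of A's second loop: consume one char of string2 against the dict, or count a miss
def encryptionStep (st : PySem.Dict Char Int × Int) (j : Char) : PySem.Dict Char Int × Int :=
  let characters := st.1
  if characters.contains j then
    let characters := characters.insert j (characters.getD j 0 - 1)   -- characters[j] -= 1
    if characters.getD j 0 == 0 then (characters.erase j, st.2)       -- del characters[j]
    else (characters, st.2)
  else (characters, st.2 + 1)                                          -- answer += 1

def encryption (string : String) : Int :=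
  let s := string.toList
  if PySem.Int.mod (s.length : Int) 2 == 1 then -1
  else
    let string1 := PySem.List.slice s none (some (PySem.Int.floordiv (s.length : Int) 2))
    let string2 := PySem.List.slice s (some (PySem.Int.floordiv (s.length : Int) 2)) none
    let characters := string1.foldl
      (fun d i =>
        let d := d.setdefault i 0                -- characters.setdefault(i, 0)
        d.insert i (d.getD i 0 + 1))             -- characters[i] += 1
      PySem.Dict.empty
    (string2.foldl encryptionStep (characters, (0 : Int))).2

-- ===== PORT B =====
-- frequency map of a list of characters (c[ch] = c.get(ch, 0) + 1)
def pvCount (l : List Char) : PySem.Dict Char Int :=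
  l.foldl (fun d ch => d.insert ch (d.getD ch 0 + 1)) PySem.Dict.empty

def encryption_alt (string : String) : Int :=
  let s := string.toList
  if PySem.Int.mod (s.length : Int) 2 == 1 then -1
  else
    let half := PySem.Int.floordiv (s.length : Int) 2
    let c1 := pvCount (PySem.List.slice s none (some half))
    let c2 := pvCount (PySem.List.slice s (some half) none)
    c2.items.foldl
      (fun answer kv =>
        let deficit := kv.2 - c1.getD kv.1 0
        if 0 < deficit then answer + deficit else answer) 0

-- ===== PRECONDITION & SPEC =====
def Spec_encryption (string : String) (out : Int) : Prop := out = encryption_alt string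
instance (string : String) (out : Int) : Decidable (Spec_encryption string out) := by unfold Spec_encryption; infer_instance

-- ===== CLAIM (what is proved, stated in full; the proofs are below) =====
def Claim_equal_encryption : Prop := ∀ (string : String), Dom_encryption string → Spec_encryption string (encryption string)

-- ===== LEMMAS AND PROOFS =====

-- abstraction of A's consume loop: the running dict seen only through its count function
def pvG (m : Char → Int) : List Char → Int
  | [] => 0
  | j :: rest => if 0 < m j then pvG (Function.update m j (m j - 1)) rest else 1 + pvG m rest

theorem pv_get?_erase {ν : Type} (d : PySem.Dict Char ν) (k c : Char) :
    (d.erase k).get? c = if c = k then none else d.get? c := by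
  rcases d with ⟨items⟩
  induction items with
  | nil => simp [PySem.Dict.erase, PySem.Dict.get?]
  | cons p rest ih =>
    simp only [PySem.Dict.erase, PySem.Dict.get?, List.filter_cons] at ih ⊢
    by_cases hp : p.1 = k <;> by_cases hc : p.1 = c <;> simp_all [beq_iff_eq]

-- A's first loop (setdefault; increment) builds exactly the counter dict
theorem pv_firstloop_eq_counter (l : List Char) :
    (l.foldl (fun d i => let d := d.setdefault i 0; d.insert i (d.getD i 0 + 1))
      PySem.Dict.empty) = PySem.Dict.counter l := by
  rw [← PySem.Dict.foldl_insert_getD_add_one_eq_counter]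
  have hstep : (fun (d : PySem.Dict Char Int) (i : Char) =>
      let d := d.setdefault i 0; d.insert i (d.getD i 0 + 1)) =
      fun d i => d.insert i (d.getD i 0 + 1) := by
    funext d i
    by_cases h : d.contains i
    · simp only [PySem.Dict.setdefault_of_contains d 0 h]
    · simp only [PySem.Dict.setdefault_of_not_contains d 0 (by simpa using h),
        PySem.Dict.getD_insert_self, PySem.Dict.insert_insert_self,
        PySem.Dict.getD_of_not_contains d 0 (by simpa using h)]
  rw [hstep]

-- counter values are positive
theorem pv_counter_pos (l : List Char) (c : Char) (v : Int)
    (h : (PySem.Dict.counter l).get? c = some v) : 0 < v := by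
  rw [PySem.Dict.get?_eq_some_iff_mem_items _ _ _ (PySem.Dict.nodup_keys_counter l)] at h
  rw [PySem.Dict.items_counter] at h
  obtain ⟨k, hk, hkv⟩ := List.mem_map.mp h
  rw [Prod.mk.injEq] at hkv
  obtain ⟨rfl, rfl⟩ := hkv
  have : k ∈ l := (PySem.Set.mem_ofList l k).mp hk
  exact_mod_cast Nat.cast_pos.mpr (List.count_pos_iff.mpr this)

-- A's consume loop computes pvG of the dict's count function
theorem pv_loop_eq_pvG (l : List Char) (d : PySem.Dict Char Int) (ans : Int)
    (hInv : ∀ c v, d.get? c = some v → 0 < v) :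
    (l.foldl encryptionStep (d, ans)).2 = ans + pvG (fun c => d.getD c 0) l := by
  induction l generalizing d ans with
  | nil => simp [pvG]
  | cons j rest ih =>
    by_cases hc : d.contains j
    · obtain ⟨v, hv⟩ := Option.isSome_iff_exists.mp (PySem.Dict.contains_eq_isSome_get? d j ▸ hc)
      have hvpos : 0 < v := hInv j v hv
      have hgd : d.getD j 0 = v := PySem.Dict.getD_of_get?_eq_some d 0 hv
      have hmj : (0 : Int) < d.getD j 0 := hgd ▸ hvpos
      have hupd : ∀ (d' : PySem.Dict Char Int),
          (∀ c, d'.get? c = if c = j then (if v - 1 = 0 then none else some (v - 1)) else d.get? c) →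
          (∀ c v', d'.get? c = some v' → 0 < v') ∧
          (fun c => d'.getD c 0) = Function.update (fun c => d.getD c 0) j (d.getD j 0 - 1) := by
        intro d' hd'
        constructor
        · intro c v' h'
          by_cases hcj : c = j
          · subst hcj
            rw [hd' c, if_pos rfl] at h'
            split at h' <;> simp_all <;> omega
          · rw [hd' c, if_neg hcj] at h'
            exact hInv c v' h'
        · funext c
          by_cases hcj : c = j
          · subst hcj
            rw [Function.update_self, PySem.Dict.getD_eq_get?_getD, hd' c, if_pos rfl, hgd]
            split <;> simp_all
          · simp [PySem.Dict.getD_eq_get?_getD, hd' c, hcj]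
      simp only [List.foldl_cons, encryptionStep, hc, if_pos, pvG, if_pos hmj]
      by_cases hv1 : v - 1 = 0
      · have hz : ((d.insert j (d.getD j 0 - 1)).getD j 0 == 0) = true := by
          simp [hgd, PySem.Dict.getD_insert_self, hv1]
        obtain ⟨hInv', hm'⟩ := hupd ((d.insert j (d.getD j 0 - 1)).erase j) (by
          intro c
          rw [pv_get?_erase]
          by_cases hcj : c = j
          · simp [hcj, hv1]
          · simp [hcj, PySem.Dict.get?_insert_of_ne _ _ hcj])
        simp only [hz, if_pos, ih _ _ hInv', hm']
      · have hz : ((d.insert j (d.getD j 0 - 1)).getD j 0 == 0) = false := by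
          simp [hgd, PySem.Dict.getD_insert_self, hv1]
        obtain ⟨hInv', hm'⟩ := hupd (d.insert j (d.getD j 0 - 1)) (by
          intro c
          by_cases hcj : c = j
          · simp [hcj, hgd, PySem.Dict.get?_insert_self, hv1]
          · simp [hcj, PySem.Dict.get?_insert_of_ne _ _ hcj])
        simp only [hz, Bool.false_eq_true, if_false, ih _ _ hInv', hm']
    · have hnone : d.get? j = none := by
        have := PySem.Dict.contains_eq_isSome_get? d j
        simp [hc] at this
        exact Option.not_isSome_iff_eq_none.mp (by simp [← this])
      have hmj : ¬ (0 : Int) < d.getD j 0 := by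
        simp [PySem.Dict.getD_eq_get?_getD, hnone]
      simp only [List.foldl_cons, encryptionStep, hc, Bool.false_eq_true, if_false, pvG,
        if_neg hmj, ih _ _ hInv]
      ring

-- pvG as an order-free sum of positive deficits
theorem pv_pvG_eq_sum (l : List Char) (m : Char → Int) (hm : ∀ c, 0 ≤ m c) :
    pvG m l = ∑ c ∈ l.toFinset, max 0 ((l.count c : Int) - m c) := by
  induction l generalizing m with
  | nil => simp [pvG]
  | cons j rest ih =>
    by_cases hj : 0 < m j
    · rw [pvG, if_pos hj, ih _ (fun c => by
        by_cases hcj : c = j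
        · subst hcj; simp; omega
        · simp [Function.update_of_ne hcj, hm c])]
      by_cases hjr : j ∈ rest.toFinset
      · rw [List.toFinset_cons, Finset.insert_eq_self.mpr hjr]
        apply Finset.sum_congr rfl
        intro c hcmem
        by_cases hcj : c = j
        · subst hcj
          rw [List.count_cons_self, Function.update_self]
          push_cast
          congr 1
          ring
        · rw [List.count_cons_of_ne (Ne.symm hcj), Function.update_of_ne hcj]
      · rw [List.toFinset_cons, Finset.sum_insert hjr]
        have hcnt : rest.count j = 0 :=
          List.count_eq_zero.mpr (fun h => hjr (List.mem_toFinset.mpr h))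
        have hjterm : max 0 ((List.count j (j :: rest) : Int) - m j) = 0 := by
          rw [List.count_cons_self, hcnt]
          simp
          omega
        rw [hjterm, zero_add]
        apply Finset.sum_congr rfl
        intro c hcmem
        have hcj : c ≠ j := fun h => hjr (h ▸ hcmem)
        rw [List.count_cons_of_ne (Ne.symm hcj), Function.update_of_ne hcj]
    · have hmj : m j = 0 := le_antisymm (by omega) (hm j)
      rw [pvG, if_neg hj, ih _ hm]
      have hsplit : ∀ c ∈ (j :: rest).toFinset,
          max 0 ((List.count c (j :: rest) : Int) - m c) =
          max 0 ((List.count c rest : Int) - m c) + (if c = j then 1 else 0) := by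
        intro c _
        by_cases hcj : c = j
        · subst hcj
          rw [List.count_cons_self, hmj, if_pos rfl]
          have h0 : (0 : Int) ≤ (List.count c rest : Int) := by positivity
          push_cast
          omega
        · rw [List.count_cons_of_ne (Ne.symm hcj), if_neg hcj, add_zero]
      rw [Finset.sum_congr rfl hsplit, Finset.sum_add_distrib, Finset.sum_ite_eq']
      have hjmem : j ∈ (j :: rest).toFinset := by simp
      rw [if_pos hjmem]
      by_cases hjr : j ∈ rest.toFinset
      · rw [List.toFinset_cons, Finset.insert_eq_self.mpr hjr]; ring
      · rw [List.toFinset_cons, Finset.sum_insert hjr]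
        have hcnt : rest.count j = 0 :=
          List.count_eq_zero.mpr (fun h => hjr (List.mem_toFinset.mpr h))
        rw [hcnt, hmj]
        simp
        ring

-- B's comparison pass over the counter's items is the same sum
theorem pv_items_fold_eq_sum (l : List Char) (m : Char → Int) :
    (PySem.Dict.counter l).items.foldl
      (fun answer kv =>
        if 0 < kv.2 - m kv.1 then answer + (kv.2 - m kv.1) else answer) 0 =
    ∑ c ∈ l.toFinset, max 0 ((l.count c : Int) - m c) := by
  have hstep : (fun (answer : Int) (kv : Char × Int) =>
      if 0 < kv.2 - m kv.1 then answer + (kv.2 - m kv.1) else answer) =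
      fun answer kv => answer + max 0 (kv.2 - m kv.1) := by
    funext a kv
    split <;> omega
  rw [hstep, PySem.List.foldl_add, PySem.Dict.items_counter, List.map_map, zero_add]
  rw [← List.sum_toFinset _ (PySem.Set.nodup_ofList l)]
  have hfs : (PySem.Set.ofList l).toFinset = l.toFinset := by
    ext c
    simp [List.mem_toFinset, PySem.Set.mem_ofList]
  rw [hfs]
  apply Finset.sum_congr rfl
  intro c _
  simp [Function.comp]

-- ===== VERDICT (by name: the statement is the Claim_ definition above) =====
theorem encryption_spec : Claim_equal_encryption := by
  intro s _
  unfold Spec_encryption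
  unfold encryption encryption_alt
  by_cases hpar : (PySem.Int.mod (s.toList.length : Int) 2 == 1) = true
  · simp only [hpar, if_pos]
  · simp only [hpar, Bool.false_eq_true, if_false]
    set first := PySem.List.slice s.toList none
      (some (PySem.Int.floordiv (s.toList.length : Int) 2)) with hfirst
    set second := PySem.List.slice s.toList
      (some (PySem.Int.floordiv (s.toList.length : Int) 2)) none with hsecond
    rw [pv_firstloop_eq_counter]
    have hB : pvCount first = PySem.Dict.counter first := by
      rw [pvCount, PySem.Dict.foldl_insert_getD_add_one_eq_counter]
    have hB2 : pvCount second = PySem.Dict.counter second := by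
      rw [pvCount, PySem.Dict.foldl_insert_getD_add_one_eq_counter]
    rw [hB, hB2, pv_loop_eq_pvG second _ 0 (pv_counter_pos first), zero_add]
    have hm : (fun c => (PySem.Dict.counter first).getD c 0) =
        fun c => ((first.count c : Int)) := by
      funext c
      exact PySem.Dict.getD_counter first c
    rw [hm, pv_pvG_eq_sum second _ (fun c => by positivity)]
    have hfold := pv_items_fold_eq_sum second
      (fun c => (PySem.Dict.counter first).getD c 0)
    rw [hfold]
    simp only [PySem.Dict.getD_counter]
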